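-- pv_equiv track=rewrite | github.com/adnathanail/aoc | 2023/day13/part2.py | get_horizontal_mirror_index
-- ===== SOURCE A (Python) =====
-- def get_horizontal_mirror_index(grid, ignore_num=-1):
--     for split_point in range(1, len(grid)):
--         first_half = grid[:split_point]
--         second_half = grid[split_point:]
--         if len(first_half) > len(second_half):
--             first_half = first_half[len(first_half) - len(second_half) :]
--         elif len(second_half) > len(first_half):
--             second_half = second_half[: len(first_half)]
--         if first_half == second_half[::-1] and split_point != ignore_num:
--             return split_point
-- ===== SOURCE B (Python) =====
-- def get_horizontal_mirror_index(grid, ignore_num=-1):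
--     # Single pass maintaining the reversed prefix; a split mirrors iff the
--     # shorter of (reversed rows above, rows below) is a prefix of the longer.
--     rev = []            # rows above the split, nearest-first
--     rest = list(grid)
--     s = 0
--     while len(rest) > 1:
--         rev = [rest[0]] + rev
--         rest = rest[1:]
--         s += 1
--         if len(rev) <= len(rest):
--             ok = rest[:len(rev)] == rev
--         else:
--             ok = rev[:len(rest)] == rest
--         if s != ignore_num and ok:
--             return s
--     return None
-- ===== Notes on version B (the rewrite author's own statement) =====
-- stated objective: alternative
-- what changed: Replaces per-split full slicing of both halves and a reversed-copy comparison with a single pass that maintains the reversed prefix and tests a prefix relation between it and the remaining rows.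
import Mathlib
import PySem

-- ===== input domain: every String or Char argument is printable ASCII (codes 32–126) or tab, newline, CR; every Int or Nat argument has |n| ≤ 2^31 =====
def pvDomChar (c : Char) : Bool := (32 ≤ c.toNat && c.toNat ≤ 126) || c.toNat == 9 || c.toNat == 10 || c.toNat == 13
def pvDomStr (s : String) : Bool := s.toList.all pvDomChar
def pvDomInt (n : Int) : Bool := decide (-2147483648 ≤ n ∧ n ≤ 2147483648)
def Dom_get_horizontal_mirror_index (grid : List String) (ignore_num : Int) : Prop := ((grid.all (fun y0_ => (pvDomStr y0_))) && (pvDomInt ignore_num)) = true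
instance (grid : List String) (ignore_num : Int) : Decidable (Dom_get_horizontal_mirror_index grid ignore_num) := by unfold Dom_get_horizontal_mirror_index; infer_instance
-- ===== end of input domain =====

-- B replaces per-split slicing of both halves and a reversed-copy comparison with a
-- single pass maintaining the reversed prefix and a prefix test (alternative, same cost).


-- ===== PORT A =====
-- the if-test inside A's loop: trim the halves to equal length, compare with the reverse
def aCond (grid : List String) (sp : Int) : Bool :=
  let first_half := PySem.List.slice grid none (some sp)          -- grid[:split_point]
  let second_half := PySem.List.slice grid (some sp) none         -- grid[split_point:]
  let fs : List String × List String :=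
    if first_half.length > second_half.length then
      (PySem.List.slice first_half
        (some ((first_half.length : Int) - (second_half.length : Int))) none, second_half)
    else if second_half.length > first_half.length then
      (first_half, PySem.List.slice second_half none (some (first_half.length : Int)))
    else (first_half, second_half)
  fs.1 == (PySem.List.slice? fs.2 none none (-1)).getD []         -- second_half[::-1]

-- A's for-loop with early return, over the remaining split points
def aLoop (grid : List String) (ign : Int) : List Int → Option Int
  | [] => none
  | sp :: rest =>
    if aCond grid sp && sp != ign then some sp else aLoop grid ign rest

def get_horizontal_mirror_index (grid : List String) (ignore_num : Int) : Option Int :=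
  aLoop grid ignore_num (PySem.List.pyRange 1 grid.length 1)

-- ===== PORT B =====
-- Source B's ok: the shorter of rev'/rest is a prefix of the longer
def bOk (rev' rest : List String) : Bool :=
  if rev'.length ≤ rest.length then rest.take rev'.length == rev'
  else rev'.take rest.length == rest

-- Source B's while-loop: rev = rows above the split (nearest-first), rest = rows below
def altGo (ign : Int) (rev : List String) (s : Int) : List String → Option Int
  | [] => none
  | [_] => none
  | r :: rest =>
    let rev' := r :: rev
    let s' := s + 1
    if s' != ign && bOk rev' rest then some s' else altGo ign rev' s' rest

def get_horizontal_mirror_index_alt (grid : List String) (ignore_num : Int) : Option Int :=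
  altGo ignore_num [] 0 grid

-- ===== PRECONDITION & SPEC =====
def Spec_get_horizontal_mirror_index (grid : List String) (ignore_num : Int) (out : Option Int) : Prop := out = get_horizontal_mirror_index_alt grid ignore_num
instance (grid : List String) (ignore_num : Int) (out : Option Int) : Decidable (Spec_get_horizontal_mirror_index grid ignore_num out) := by unfold Spec_get_horizontal_mirror_index; infer_instance

-- ===== CLAIM (what is proved, stated in full; the proofs are below) =====
def Claim_equal_get_horizontal_mirror_index : Prop := ∀ (grid : List String) (ignore_num : Int), Dom_get_horizontal_mirror_index grid ignore_num → Spec_get_horizontal_mirror_index grid ignore_num (get_horizontal_mirror_index grid ignore_num)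

-- ===== LEMMAS AND PROOFS =====

theorem beq_rev (x y : List String) : (x == y.reverse) = (y == x.reverse) := by
  by_cases h : x = y.reverse
  · subst h; simp
  · have h2 : y ≠ x.reverse := fun hy => h (by simp [hy])
    simp [h, h2]

theorem beq_rev' (x y : List String) : (x == y.reverse) = (x.reverse == y) := by
  by_cases h : x = y.reverse
  · subst h; simp
  · have h2 : x.reverse ≠ y := fun hy => h (by simp [← hy])
    simp [h, h2]

-- the per-split condition of A equals the prefix test of B (sp = s+1, 0 ≤ s < n-1)
theorem cond_eq (grid : List String) (s : Nat) (hs : s + 1 < grid.length) :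
    aCond grid ((s : Int) + 1) = bOk (grid.take (s+1)).reverse (grid.drop (s+1)) := by
  unfold aCond bOk
  have hcast : ((s : Int) + 1) = ((s + 1 : Nat) : Int) := by push_cast; ring
  simp only [hcast, PySem.List.slice_to_natCast, PySem.List.slice_from_natCast]
  have hf : (grid.take (s+1)).length = s + 1 := by
    simp [List.length_take]; omega
  have hsh : (grid.drop (s+1)).length = grid.length - (s+1) := by simp
  simp only [hf, hsh, List.length_reverse]
  by_cases h1 : s + 1 > grid.length - (s+1)
  · have hle : ¬ (s + 1 ≤ grid.length - (s+1)) := by omega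
    have hcast2 : ((s+1 : Nat) : Int) - ((grid.length - (s+1) : Nat) : Int)
        = (((s+1) - (grid.length - (s+1)) : Nat) : Int) :=
      (Nat.cast_sub (by omega)).symm
    simp only [if_pos h1, if_neg hle, hcast2, PySem.List.slice_from_natCast,
      PySem.List.slice?_none_none_neg_one, Option.getD_some]
    rw [List.take_reverse, hf]
    exact beq_rev' _ _
  · by_cases h2 : grid.length - (s+1) > s + 1
    · have hle : s + 1 ≤ grid.length - (s+1) := by omega
      simp only [if_neg h1, if_pos h2, if_pos hle,
        PySem.List.slice?_none_none_neg_one, Option.getD_some]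
      rw [beq_rev]
    · have heq : grid.length - (s+1) = s + 1 := by omega
      have hle : s + 1 ≤ grid.length - (s+1) := by omega
      simp only [if_neg h1, if_neg h2, if_pos hle,
        PySem.List.slice?_none_none_neg_one, Option.getD_some]
      rw [beq_rev]
      congr 1
      rw [List.take_of_length_le (by omega)]

-- loop invariant: after s steps, rev is the reversed prefix, rest the suffix
theorem go_eq (grid : List String) (ign : Int) (s : Nat) (hs : s ≤ grid.length) :
    altGo ign (grid.take s).reverse (s : Int) (grid.drop s)
      = aLoop grid ign (PySem.List.pyRange ((s : Int) + 1) grid.length 1) := by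
  rcases hrest : grid.drop s with _ | ⟨r, rest'⟩
  · have hn : grid.length ≤ s := by
      have := congrArg List.length hrest; simp at this; omega
    rw [PySem.List.pyRange_one_eq_nil (by omega)]
    simp [altGo, aLoop]
  · rcases rest' with _ | ⟨r2, rest2⟩
    · have hn : grid.length = s + 1 := by
        have := congrArg List.length hrest; simp at this; omega
      rw [PySem.List.pyRange_one_eq_nil (by omega)]
      simp [altGo, aLoop]
    · have hlen : grid.length - s = rest2.length + 2 := by
        have := congrArg List.length hrest; simp at this; omega
      have hs2 : s + 1 < grid.length := by omega
      have hdrop1 : grid.drop (s+1) = r2 :: rest2 := by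
        have h : grid.drop (s+1) = (grid.drop s).drop 1 := by
          rw [List.drop_drop]
        rw [h, hrest]; rfl
      have hget : grid[s]? = some r := by
        rw [← List.head?_drop, hrest]; rfl
      have htake1 : grid.take (s+1) = grid.take s ++ [r] := by
        rw [List.take_add_one, hget]; rfl
      have hrev1 : (grid.take (s+1)).reverse = r :: (grid.take s).reverse := by
        rw [htake1]; simp
      rw [PySem.List.pyRange_one_cons (by omega)]
      have hc : aCond grid ((s : Int) + 1) = bOk (r :: (grid.take s).reverse) (r2 :: rest2) := by
        rw [cond_eq grid s hs2, hrev1, hdrop1]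
      have hih := go_eq grid ign (s+1) (by omega)
      rw [hrev1, hdrop1] at hih
      simp only [altGo, aLoop, hc, Bool.and_comm]
      push_cast at hih ⊢
      rw [hih]
termination_by grid.length - s

-- ===== VERDICT (by name: the statement is the Claim_ definition above) =====
theorem get_horizontal_mirror_index_spec : Claim_equal_get_horizontal_mirror_index := by
  intro grid ignore_num _
  unfold Spec_get_horizontal_mirror_index get_horizontal_mirror_index get_horizontal_mirror_index_alt
  have h := go_eq grid ignore_num 0 (Nat.zero_le _)
  simpa using h.symm
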